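-- pv_equiv track=rewrite | github.com/liangxuCHEN/package_function | package_tools.py | find_small_shape
-- ===== SOURCE A (Python) =====
-- def find_small_shape(shape_list):
--     if len(shape_list) == 1:
--         return shape_list[0]
--
--     min_size = shape_list[0][0] * shape_list[0][1]
--     min_shape = shape_list[0]
--
--     for j in range(1, len(shape_list)):
--         # 找最小面积
--         if shape_list[j][0] * shape_list[j][1] < min_size:
--             min_size = shape_list[j][0] * shape_list[j][1]
--             min_shape = shape_list[j]
--
--     return min_shape
-- ===== SOURCE B (Python) =====
-- def find_small_shape(shape_list):
--     # Sort-then-pick: stable sort by area keeps the first-on-tie shape first;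
--     # [0] raises IndexError on an empty list, like A's shape_list[0].
--     return sorted(shape_list, key=lambda s: s[0] * s[1])[0]
-- ===== Notes on version B (the rewrite author's own statement) =====
-- stated objective: idiomatic
-- what changed: Replaced the explicit running-minimum index loop with a stable sort by area followed by taking the first element.
import Mathlib
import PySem

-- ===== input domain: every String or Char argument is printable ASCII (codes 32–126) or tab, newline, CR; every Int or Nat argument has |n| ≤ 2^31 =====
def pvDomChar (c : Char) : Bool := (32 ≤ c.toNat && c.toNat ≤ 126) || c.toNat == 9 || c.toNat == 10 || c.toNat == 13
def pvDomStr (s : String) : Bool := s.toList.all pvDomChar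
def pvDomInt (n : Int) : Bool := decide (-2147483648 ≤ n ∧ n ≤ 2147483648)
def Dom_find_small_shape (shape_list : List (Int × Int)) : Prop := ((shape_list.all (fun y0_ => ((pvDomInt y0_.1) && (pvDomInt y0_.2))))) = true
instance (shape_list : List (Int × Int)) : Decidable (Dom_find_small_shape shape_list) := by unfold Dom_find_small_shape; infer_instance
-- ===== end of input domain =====

-- B replaces A's explicit running-minimum loop by a stable sort-by-area then taking
-- the first element (idiomatic sorted(...)[0]); equal on every nonempty list.


-- ===== PORT A =====
def find_small_shape (shape_list : List (Int × Int)) : Int × Int :=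
  if shape_list.length == 1 then
    PySem.List.pyGetD shape_list 0 (0, 0)
  else
    let s0 := PySem.List.pyGetD shape_list 0 (0, 0)
    let res := (PySem.List.pyRange 1 (shape_list.length : Int)).foldl
      (fun (st : Int × (Int × Int)) j =>
        let sj := PySem.List.pyGetD shape_list j (0, 0)
        if sj.1 * sj.2 < st.1 then (sj.1 * sj.2, sj) else st)
      (s0.1 * s0.2, s0)
    res.2

-- ===== PORT B =====
def find_small_shape_alt (shape_list : List (Int × Int)) : Int × Int :=
  PySem.List.pyGetD (PySem.List.sorted shape_list (fun s => s.1 * s.2)) 0 (0, 0)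

-- ===== PRECONDITION & SPEC =====
-- Both A and B raise IndexError on the empty list (shape_list[0] / sorted(...)[0]).
def Pre_find_small_shape (shape_list : List (Int × Int)) : Prop := shape_list ≠ []
instance (shape_list : List (Int × Int)) : Decidable (Pre_find_small_shape shape_list) := by unfold Pre_find_small_shape; infer_instance
def pvWitness_find_small_shape : (List (Int × Int)) := [(2, 3), (1, 4), (5, 1)]
def Spec_find_small_shape (shape_list : List (Int × Int)) (out : Int × Int) : Prop := out = find_small_shape_alt shape_list
instance (shape_list : List (Int × Int)) (out : Int × Int) : Decidable (Spec_find_small_shape shape_list out) := by unfold Spec_find_small_shape; infer_instance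

-- ===== CLAIM (what is proved, stated in full; the proofs are below) =====
def Claim_equal_find_small_shape : Prop := ∀ (shape_list : List (Int × Int)), Dom_find_small_shape shape_list → Pre_find_small_shape shape_list → Spec_find_small_shape shape_list (find_small_shape shape_list)

-- ===== LEMMAS AND PROOFS =====

-- Running first-minimum over the tail, carrying only the shape.
def pvScanMin (t : List (Int × Int)) (m : Int × Int) : Int × Int :=
  t.foldl (fun s x => if x.1 * x.2 < s.1 * s.2 then x else s) m

-- A's pair-state fold equals the shape-only fold (min_size is always the area of min_shape).
theorem pvPairFold_eq (t : List (Int × Int)) (m : Int × Int) :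
    t.foldl (fun (st : Int × (Int × Int)) x =>
        if x.1 * x.2 < st.1 then (x.1 * x.2, x) else st) (m.1 * m.2, m)
      = ((pvScanMin t m).1 * (pvScanMin t m).2, pvScanMin t m) := by
  induction t generalizing m with
  | nil => rfl
  | cons x t ih =>
      simp only [pvScanMin, List.foldl_cons]
      by_cases h : x.1 * x.2 < m.1 * m.2 <;> simp [h, ih, pvScanMin]

-- Head of the stable insertion sort's accumulator tracks the running first-minimum.
theorem pvHead_foldl_insertBy (t : List (Int × Int)) (acc : List (Int × Int)) (m : Int × Int)
    (h : acc.head? = some m) :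
    (t.foldl (fun a x => PySem.List.insertBy
        (fun a b => decide (a.1 * a.2 < b.1 * b.2)) x a) acc).head? = some (pvScanMin t m) := by
  induction t generalizing acc m with
  | nil => simpa [pvScanMin] using h
  | cons x t ih =>
      cases acc with
      | nil => simp at h
      | cons y ys =>
          have hm : y = m := by simpa using h
          subst hm
          simp only [List.foldl_cons, pvScanMin]
          by_cases hlt : x.1 * x.2 < y.1 * y.2
          · have hins : PySem.List.insertBy (fun a b => decide (a.1 * a.2 < b.1 * b.2)) x (y :: ys)
                = x :: y :: ys := by simp [PySem.List.insertBy, hlt]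
            rw [hins]
            simpa [pvScanMin, hlt] using ih (x :: y :: ys) x rfl
          · have hh : (PySem.List.insertBy (fun a b => decide (a.1 * a.2 < b.1 * b.2)) x (y :: ys)).head?
                = some y := by simp [PySem.List.insertBy, hlt]
            obtain ⟨rest, hrest⟩ : ∃ rest, PySem.List.insertBy
                (fun a b => decide (a.1 * a.2 < b.1 * b.2)) x (y :: ys) = y :: rest := by
              cases hins : PySem.List.insertBy (fun a b => decide (a.1 * a.2 < b.1 * b.2)) x (y :: ys) with
              | nil => rw [hins] at hh; simp at hh
              | cons z zs => rw [hins] at hh; simp at hh; exact ⟨zs, by rw [hh]⟩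
            rw [hrest]
            simpa [pvScanMin, hlt] using ih (y :: rest) y rfl

-- B's head is the running first-minimum of the whole list.
theorem pvAlt_eq_scan (x : Int × Int) (t : List (Int × Int)) :
    find_small_shape_alt (x :: t) = pvScanMin t x := by
  unfold find_small_shape_alt
  rw [PySem.List.sorted_eq_foldl_insertBy]
  have h := pvHead_foldl_insertBy t [x] x rfl
  simp only [List.foldl_cons] at h ⊢
  have hx : PySem.List.insertBy (fun a b => decide (a.1 * a.2 < b.1 * b.2)) x ([] : List (Int × Int)) = [x] := by
    simp [PySem.List.insertBy]
  rw [hx]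
  cases hs : (t.foldl (fun a y => PySem.List.insertBy
      (fun a b => decide (a.1 * a.2 < b.1 * b.2)) y a) [x]) with
  | nil => rw [hs] at h; simp at h
  | cons z zs =>
      rw [hs] at h
      simp only [List.head?_cons, Option.some.injEq] at h
      simp [PySem.List.pyGetD_zero_cons, h]

-- ===== VERDICT (by name: the statement is the Claim_ definition above) =====
theorem find_small_shape_spec : Claim_equal_find_small_shape := by
  intro shape_list _ hpre
  unfold Spec_find_small_shape
  cases shape_list with
  | nil => exact absurd rfl hpre
  | cons x t =>
      rw [pvAlt_eq_scan]
      unfold find_small_shape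
      cases t with
      | nil => simp [pvScanMin, PySem.List.pyGetD_zero_cons]
      | cons y ys =>
          have hlen : ((x :: y :: ys).length == 1) = false := by simp
          simp only [hlen, Bool.false_eq_true, if_false]
          have h0 : PySem.List.pyGetD (x :: y :: ys) 0 (0, 0) = x :=
            PySem.List.pyGetD_zero_cons _ _ _
          have hfold := PySem.List.foldl_pyRange_pyGetD' (x :: y :: ys) (0, 0)
            (fun (st : Int × (Int × Int)) sj =>
              if sj.1 * sj.2 < st.1 then (sj.1 * sj.2, sj) else st)
            ((x.1 * x.2, x)) (a := 1) (by norm_num)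
          simp only [h0]
          rw [hfold]
          simp only [Int.toNat_one, List.drop_one, List.tail_cons]
          rw [pvPairFold_eq]
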